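-- pv_equiv track=rewrite | github.com/aiman-mumtaz/interview-prep-2026 | 2610-convert-an-array-into-a-2d-array-with-conditions/2610-convert-an-array-into-a-2d-array-with-conditions.py | findMatrix
-- ===== SOURCE A (Python) =====
-- from collections import Counter
--
-- def findMatrix(nums: list[int]) -> list[list[int]]:
--     res = []
--     counts = Counter()
--
--     for num in nums:
--         # How many times have we seen this number before?
--         row_idx = counts[num]
--
--         # If the current frequency requires a new row, add one
--         if row_idx >= len(res):
--             res.append([])
--
--         # Place the number in the corresponding row
--         res[row_idx].append(num)
--
--         # Increment frequency for next time we see this number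
--         counts[num] += 1
--
--     return res
-- ===== SOURCE B (Python) =====
-- def findMatrix(nums: list[int]) -> list[list[int]]:
--     rows = []
--     for num in nums:
--         for row in rows:
--             if num not in row:
--                 row.append(num)
--                 break
--         else:
--             rows.append([num])
--     return rows
-- ===== Notes on version B (the rewrite author's own statement) =====
-- stated objective: simpler
-- what changed: Drops the Counter entirely: for each number B scans the existing rows and appends it to the first row that does not already contain it (new row if all do), instead of indexing rows by a maintained frequency map.
import Mathlib
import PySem

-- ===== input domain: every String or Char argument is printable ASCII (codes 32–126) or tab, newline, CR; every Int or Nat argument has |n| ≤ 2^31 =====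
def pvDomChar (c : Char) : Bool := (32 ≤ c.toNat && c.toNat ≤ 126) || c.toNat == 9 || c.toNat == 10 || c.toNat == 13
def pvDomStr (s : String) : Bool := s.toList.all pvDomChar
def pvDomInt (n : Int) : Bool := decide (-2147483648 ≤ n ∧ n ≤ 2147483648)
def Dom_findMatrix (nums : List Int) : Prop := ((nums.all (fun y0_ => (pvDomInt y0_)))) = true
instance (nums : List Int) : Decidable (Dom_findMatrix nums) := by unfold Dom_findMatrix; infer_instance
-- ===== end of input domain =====

-- B drops the Counter: each number goes into the first row not already containing it (simpler decomposition).

-- ===== PORT A =====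
-- one loop iteration of A: row_idx = counts[num]; maybe append a fresh row; res[row_idx].append(num); counts[num] += 1
-- (row_idx is a Counter value, hence ≥ 0 and ≤ len(res) after the conditional append, so the
--  total forms pyGetD/pySetD are exact here)
def stepA (st : List (List Int) × PySem.Dict Int Int) (num : Int) : List (List Int) × PySem.Dict Int Int :=
  let res := st.1
  let counts := st.2
  let row_idx := counts.getD num 0
  let res := if row_idx ≥ (res.length : Int) then res ++ [[]] else res
  let res := PySem.List.pySetD res row_idx (PySem.List.pyGetD res row_idx [] ++ [num])
  let counts := counts.modify num 0 (· + 1)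
  (res, counts)

def findMatrix (nums : List Int) : List (List Int) :=
  (nums.foldl stepA ([], PySem.Dict.empty)).1

-- ===== PORT B =====
-- the inner 'for row in rows … break / else' scan: append num to the first row lacking it
def placeRow (rows : List (List Int)) (num : Int) : List (List Int) :=
  match rows with
  | [] => [[num]]
  | r :: rs => if r.contains num then r :: placeRow rs num else (r ++ [num]) :: rs

def findMatrix_alt (nums : List Int) : List (List Int) :=
  nums.foldl placeRow []

-- ===== PRECONDITION & SPEC =====
def Spec_findMatrix (nums : List Int) (out : List (List Int)) : Prop := out = findMatrix_alt nums
instance (nums : List Int) (out : List (List Int)) : Decidable (Spec_findMatrix nums out) := by unfold Spec_findMatrix; infer_instance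

-- ===== CLAIM (what is proved, stated in full; the proofs are below) =====
def Claim_equal_findMatrix : Prop := ∀ (nums : List Int), Dom_findMatrix nums → Spec_findMatrix nums (findMatrix nums)

-- ===== LEMMAS AND PROOFS =====

-- invariant tying A's state to B's rows: counts[v] = n means exactly the first n rows contain v
def InvAB (res : List (List Int)) (counts : PySem.Dict Int Int) : Prop :=
  ∀ v : Int, ∃ n : Nat, counts.getD v 0 = (n : Int) ∧ n ≤ res.length ∧
    ∀ i (hi : i < res.length), res[i].contains v = decide (i < n)

lemma placeRow_char (num : Int) : ∀ (res : List (List Int)) (n : Nat),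
    n ≤ res.length →
    (∀ i (hi : i < res.length), res[i].contains num = decide (i < n)) →
    placeRow res num =
      if h : n < res.length then res.set n (res[n] ++ [num]) else res ++ [[num]] := by
  intro res
  induction res with
  | nil =>
    intro n hn _
    have : n = 0 := by simpa using hn
    subst this
    simp [placeRow]
  | cons r rs ih =>
    intro n hn hmem
    have h0 := hmem 0 (by simp)
    cases n with
    | zero =>
      simp at h0
      simp [placeRow, h0]
    | succ m =>
      simp at h0
      have hrest : ∀ i (hi : i < rs.length), rs[i].contains num = decide (i < m) := by
        intro i hi
        have := hmem (i + 1) (by simp; omega)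
        simpa using this
      have hm : m ≤ rs.length := by simp at hn; omega
      have := ih m hm hrest
      by_cases h : m < rs.length
      · simp [placeRow, h0, this, h]
      · simp [placeRow, h0, this, h]

lemma step_eq (num : Int) (res : List (List Int)) (counts : PySem.Dict Int Int)
    (hInv : InvAB res counts) :
    (stepA (res, counts) num).1 = placeRow res num ∧
    InvAB (placeRow res num) ((stepA (res, counts) num).2) := by
  obtain ⟨n, hc, hn, hmem⟩ := hInv num
  have hchar := placeRow_char num res n hn hmem
  have hstep2 : (stepA (res, counts) num).2 = counts.modify num 0 (· + 1) := rfl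
  by_cases h : n < res.length
  · -- existing row n gets num
    have h1 : ¬ ((counts.getD num 0) ≥ (res.length : Int)) := by rw [hc]; omega
    have hif : ¬ ((n : Int) ≥ (res.length : Int)) := by omega
    have hfst : (stepA (res, counts) num).1 = res.set n (res[n] ++ [num]) := by
      simp only [stepA, hc]
      rw [if_neg hif, PySem.List.pySetD_natCast, PySem.List.pyGetD_natCast,
        List.getD_eq_getElem _ _ h]
    refine ⟨by rw [hfst, hchar]; simp [h], ?_⟩
    rw [hchar]; simp only [h, dif_pos]
    intro v
    rw [hstep2]
    by_cases hv : v = num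
    · subst hv
      refine ⟨n + 1, ?_, by simp; omega, ?_⟩
      · rw [PySem.Dict.getD_modify_self, hc]; push_cast; ring
      · intro i hi
        simp only [List.length_set] at hi
        rw [List.getElem_set]
        by_cases hin : n = i
        · rw [if_pos hin, List.contains_append, ← hin]
          simp
        · rw [if_neg hin, hmem i hi]
          simp; omega
    · obtain ⟨m, hcm, hmlen, hmmem⟩ := hInv v
      refine ⟨m, ?_, by simpa using hmlen, ?_⟩
      · rw [PySem.Dict.getD_modify, if_neg hv, hcm]
      · intro i hi
        simp only [List.length_set] at hi
        rw [List.getElem_set]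
        by_cases hin : n = i
        · rw [if_pos hin, List.contains_append, ← hin, hmmem n h]
          simp [hv, hin]
        · rw [if_neg hin]
          exact hmmem i hi
  · -- n = res.length: a new row is appended
    have hnl : n = res.length := by omega
    have h1 : (counts.getD num 0) ≥ (res.length : Int) := by rw [hc]; omega
    have hlen2 : n < (res ++ [[]]).length := by simp; omega
    have hif : ((n : Int) ≥ (res.length : Int)) := by omega
    have hfst : (stepA (res, counts) num).1 = res ++ [[num]] := by
      simp only [stepA, hc]
      rw [if_pos hif, PySem.List.pySetD_natCast, PySem.List.pyGetD_natCast,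
        List.getD_eq_getElem _ _ hlen2]
      rw [List.getElem_append_right (by omega)]
      rw [List.set_append_right _ _ (by omega)]
      simp [hnl]
    refine ⟨by rw [hfst, hchar]; simp [h], ?_⟩
    rw [hchar]; simp only [h, dif_neg, not_false_iff]
    intro v
    rw [hstep2]
    by_cases hv : v = num
    · subst hv
      refine ⟨n + 1, ?_, by simp; omega, ?_⟩
      · rw [PySem.Dict.getD_modify_self, hc]; push_cast; ring
      · intro i hi
        simp only [List.length_append, List.length_cons, List.length_nil] at hi
        rw [List.getElem_append]
        split
        · next hin => rw [hmem i hin]; simp; omega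
        · next hin =>
            have h0 : i - res.length = 0 := by omega
            simp [h0]
            omega
    · obtain ⟨m, hcm, hmlen, hmmem⟩ := hInv v
      refine ⟨m, ?_, by simp; omega, ?_⟩
      · rw [PySem.Dict.getD_modify, if_neg hv, hcm]
      · intro i hi
        simp only [List.length_append, List.length_cons, List.length_nil] at hi
        rw [List.getElem_append]
        split
        · next hin => exact hmmem i hin
        · next hin =>
            have h0 : i - res.length = 0 := by omega
            simp [h0, hv]
            omega

lemma foldl_eq (nums : List Int) : ∀ (res : List (List Int)) (counts : PySem.Dict Int Int),
    InvAB res counts → (nums.foldl stepA (res, counts)).1 = nums.foldl placeRow res := by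
  induction nums with
  | nil => intro res counts _; rfl
  | cons num rest ih =>
    intro res counts hInv
    obtain ⟨h1, h2⟩ := step_eq num res counts hInv
    have hpair : stepA (res, counts) num = (placeRow res num, (stepA (res, counts) num).2) :=
      Prod.ext h1 rfl
    rw [List.foldl_cons, List.foldl_cons, hpair]
    exact ih _ _ h2

lemma inv_init : InvAB [] PySem.Dict.empty := by
  intro v
  exact ⟨0, rfl, by simp, by simp⟩

-- ===== VERDICT (by name: the statement is the Claim_ definition above) =====
theorem findMatrix_spec : Claim_equal_findMatrix := by
  intro nums _
  unfold Spec_findMatrix findMatrix findMatrix_alt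
  exact foldl_eq nums [] PySem.Dict.empty inv_init
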